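-- pv_equiv track=rewrite | github.com/FRESH-TUNA/Algorithm | 배열/행렬테두리회전하기.py | turning_and_min
-- ===== SOURCE A (Python) =====
-- def turning_and_min(matrix, query):
--     r1, c1, r2, c2 = query
--     inserted_value, minimum = matrix[r1][c1], matrix[r1][c1]
--     rp, cp = r1, c1 + 1
--
--     while not (rp == r1 and cp == c1):
--         # swap
--         inserted_value_temp = matrix[rp][cp]
--         matrix[rp][cp] = inserted_value
--         inserted_value = inserted_value_temp
--         # minimum
--         minimum = min(minimum, inserted_value)
--         # rotate
--         if rp == r1 and cp < c2: cp += 1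
--         elif cp == c2 and rp < r2: rp += 1
--         elif rp == r2 and cp > c1: cp -= 1
--         else: rp -= 1
--
--     # last element change and return minimum result
--     matrix[rp][cp] = inserted_value
--     return min(minimum, inserted_value)
-- ===== SOURCE B (Python) =====
-- def turning_and_min(matrix, query):
--     r1, c1, r2, c2 = query
--     coords = [(r1, c) for c in range(c1, c2 + 1)]
--     coords += [(r, c2) for r in range(r1 + 1, r2 + 1)]
--     coords += [(r2, c) for c in range(c2 - 1, c1 - 1, -1)]
--     coords += [(r, c1) for r in range(r2 - 1, r1, -1)]
--     vals = [matrix[r][c] for r, c in coords]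
--     for (r, c), v in zip(coords[1:] + coords[:1], vals):
--         matrix[r][c] = v
--     return min(vals)
-- ===== Notes on version B (the rewrite author's own statement) =====
-- stated objective: alternative
-- what changed: Replaces A's interleaved carry-swap walk (a while loop stepping around the border with an if-chain, swapping a carried value and folding the minimum as it goes) by a gather/shift decomposition: build the clockwise border coordinate list from four ranges, snapshot the values, write each snapshot value to the next coordinate in the cycle, and return min of the snapshot.
-- outside the precondition, e.g. on turning_and_min([[4, 9, 2]], (0, 1, 0, 0)): A returns 2, B raises ValueError; on turning_and_min([[5, 1, 7]], (0, 1, 0, 2)): A returns 1, B returns 1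
import Mathlib
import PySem

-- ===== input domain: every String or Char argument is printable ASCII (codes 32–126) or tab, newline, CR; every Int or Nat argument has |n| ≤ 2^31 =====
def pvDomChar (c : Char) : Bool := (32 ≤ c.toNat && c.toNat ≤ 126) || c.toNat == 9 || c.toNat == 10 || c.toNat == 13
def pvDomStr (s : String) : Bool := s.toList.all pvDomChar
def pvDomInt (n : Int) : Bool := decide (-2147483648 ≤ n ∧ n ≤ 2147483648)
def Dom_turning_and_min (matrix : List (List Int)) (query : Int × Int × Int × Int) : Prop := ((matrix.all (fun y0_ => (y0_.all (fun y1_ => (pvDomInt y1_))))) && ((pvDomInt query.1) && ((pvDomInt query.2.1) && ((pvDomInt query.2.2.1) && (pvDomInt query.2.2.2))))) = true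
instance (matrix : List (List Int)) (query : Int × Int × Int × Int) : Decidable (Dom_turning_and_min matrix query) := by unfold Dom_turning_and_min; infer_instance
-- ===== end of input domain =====

-- B replaces A's interleaved carry-swap border walk by a gather/shift decomposition (coordinate
-- list from four ranges, snapshot, cyclic shift, min of the snapshot); both mutate the matrix in
-- place (the written values can differ when negative indices alias the same physical cell), so
-- the equivalence proved here is about the return value only.

-- ===== PORT A =====
-- matrix[i][j]  (two chained Python subscripts, negative = from the end; none = IndexError)
def pvRead2 (m : List (List Int)) (i j : Int) : Option Int :=
  (PySem.List.pyGet? m i).bind fun row => PySem.List.pyGet? row j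

-- matrix[i][j] = x  (index row i, set item j in place; none = IndexError)
def pvWrite2 (m : List (List Int)) (i j x : Int) : Option (List (List Int)) :=
  (PySem.List.pyGet? m i).bind fun row =>
    (PySem.List.pySet? row j x).map fun row' => PySem.List.pySetD m i row'

-- the while loop of A, step for step (the fuel only makes the loop total; none = IndexError or
-- exhausted fuel, reached only outside Pre_)
def pvLoopA (r1 c1 r2 c2 : Int) : Nat → List (List Int) → Int → Int → Int → Int → Option Int
  | 0, _, _, _, _, _ => none
  | fuel + 1, m, rp, cp, ins, minv =>
    if rp = r1 ∧ cp = c1 then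
      (pvWrite2 m rp cp ins).map fun _ => min minv ins
    else
      match pvRead2 m rp cp with
      | none => none
      | some t =>
        match pvWrite2 m rp cp ins with
        | none => none
        | some m' =>
          let minv' := min minv t
          if rp = r1 ∧ cp < c2 then pvLoopA r1 c1 r2 c2 fuel m' rp (cp + 1) t minv'
          else if cp = c2 ∧ rp < r2 then pvLoopA r1 c1 r2 c2 fuel m' (rp + 1) cp t minv'
          else if rp = r2 ∧ cp > c1 then pvLoopA r1 c1 r2 c2 fuel m' rp (cp - 1) t minv'
          else pvLoopA r1 c1 r2 c2 fuel m' (rp - 1) cp t minv'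

def turning_and_min (matrix : List (List Int)) (query : Int × Int × Int × Int) : Int :=
  match query with
  | (r1, c1, r2, c2) =>
    match pvRead2 matrix r1 c1 with
    | none => 0
    | some v =>
      (pvLoopA r1 c1 r2 c2 (2 * ((r2 - r1).toNat + (c2 - c1).toNat) + 2)
        matrix r1 (c1 + 1) v v).getD 0

-- ===== PORT B =====
-- the four range comprehensions of Source B, concatenated clockwise
def pvCoords (r1 c1 r2 c2 : Int) : List (Int × Int) :=
  ((PySem.List.pyRange c1 (c2 + 1) 1).map fun c => (r1, c)) ++
  ((PySem.List.pyRange (r1 + 1) (r2 + 1) 1).map fun r => (r, c2)) ++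
  ((PySem.List.pyRange (c2 - 1) (c1 - 1) (-1)).map fun c => (r2, c)) ++
  ((PySem.List.pyRange (r2 - 1) r1 (-1)).map fun r => (r, c1))

def turning_and_min_alt (matrix : List (List Int)) (query : Int × Int × Int × Int) : Int :=
  match query with
  | (r1, c1, r2, c2) =>
    let coords := pvCoords r1 c1 r2 c2
    match coords.mapM (fun p => pvRead2 matrix p.1 p.2) with
    | none => 0
    | some vals =>
      let _m := ((coords.drop 1 ++ coords.take 1).zip vals).foldl
        (fun m pv => (pvWrite2 m pv.1.1 pv.1.2 pv.2).getD m) matrix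
      (PySem.List.min? vals (fun x => x)).getD 0

-- ===== PRECONDITION & SPEC =====
-- Pre_ is the natural domain of the problem: a genuine submatrix (r1 < r2, c1 < c2) whose border
-- subscripts all resolve under Python indexing (negative values wrap).  It excludes degenerate or
-- inverted rectangles (r1 >= r2 or c1 >= c2), on most of which A loops forever or raises
-- IndexError; where A still returns (r1 = r2), its walk reads cells outside the true border, an
-- accidental value no caller of a border rotation would specify.
def Pre_turning_and_min (matrix : List (List Int)) (query : Int × Int × Int × Int) : Prop :=
  query.1 < query.2.2.1 ∧ query.2.1 < query.2.2.2 ∧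
  -(matrix.length : Int) ≤ query.1 ∧ query.2.2.1 < (matrix.length : Int) ∧
  ∀ r ∈ PySem.List.pyRange query.1 (query.2.2.1 + 1) 1,
    -((PySem.List.pyGetD matrix r []).length : Int) ≤ query.2.1 ∧
      query.2.2.2 < ((PySem.List.pyGetD matrix r []).length : Int)
instance (matrix : List (List Int)) (query : Int × Int × Int × Int) : Decidable (Pre_turning_and_min matrix query) := by unfold Pre_turning_and_min; infer_instance

def pvWitness_turning_and_min : List (List Int) × (Int × Int × Int × Int) :=
  ([[1, 2], [3, 4]], (0, 0, 1, 1))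

def Spec_turning_and_min (matrix : List (List Int)) (query : Int × Int × Int × Int) (out : Int) : Prop := out = turning_and_min_alt matrix query
instance (matrix : List (List Int)) (query : Int × Int × Int × Int) (out : Int) : Decidable (Spec_turning_and_min matrix query out) := by unfold Spec_turning_and_min; infer_instance

-- ===== CLAIM (what is proved, stated in full; the proofs are below) =====
def Claim_equal_turning_and_min : Prop := ∀ (matrix : List (List Int)) (query : Int × Int × Int × Int), Dom_turning_and_min matrix query → Pre_turning_and_min matrix query → Spec_turning_and_min matrix query (turning_and_min matrix query)

-- ===== LEMMAS AND PROOFS =====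

-- physical (normalised) coordinates of a Python subscript pair, and the cell it denotes
def pvPhys (m : List (List Int)) (p : Int × Int) : Option (Nat × Nat) :=
  match PySem.List.pyIdx? m.length p.1 with
  | none => none
  | some k =>
    match PySem.List.pyIdx? (m.getD k []).length p.2 with
    | none => none
    | some t => some (k, t)

def pvCell (m : List (List Int)) (q : Nat × Nat) : Option Int := (m.getD q.1 [])[q.2]?

theorem pvIdx_lt {n : Nat} {i : Int} {k : Nat} (h : PySem.List.pyIdx? n i = some k) : k < n := by
  unfold PySem.List.pyIdx? at h
  split_ifs at h <;> simp_all <;> omega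

theorem pvRead2_eq (m : List (List Int)) (i j : Int) :
    pvRead2 m i j = (pvPhys m (i, j)).bind (pvCell m) := by
  unfold pvRead2 pvPhys pvCell PySem.List.pyGet?
  rcases hk : PySem.List.pyIdx? m.length i with - | k
  · simp
  · have hklt := pvIdx_lt hk
    have hgd : m.getD k [] = m[k] := List.getD_eq_getElem m [] hklt
    rcases ht : PySem.List.pyIdx? (m.getD k []).length j with - | t
    · rw [hgd] at ht
      simp [List.getElem?_eq_getElem hklt, ht]
    · have htlt := pvIdx_lt ht
      rw [hgd] at ht htlt
      simp [List.getElem?_eq_getElem hklt, ht, List.getElem?_eq_getElem htlt]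

theorem pvWrite2_eq {m : List (List Int)} {i j : Int} {k t : Nat} (x : Int)
    (h : pvPhys m (i, j) = some (k, t)) :
    pvWrite2 m i j x = some (m.set k ((m.getD k []).set t x)) := by
  unfold pvPhys at h
  rcases hk : PySem.List.pyIdx? m.length i with - | k' <;> simp only [hk] at h
  · exact absurd h (by simp)
  rcases ht : PySem.List.pyIdx? (m.getD k' []).length j with - | t' <;> simp only [ht] at h
  · exact absurd h (by simp)
  simp only [Option.some.injEq, Prod.mk.injEq] at h
  obtain ⟨rfl, rfl⟩ := h
  have hklt := pvIdx_lt hk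
  have hgd : m.getD k' [] = m[k'] := List.getD_eq_getElem m [] hklt
  rw [hgd] at ht
  unfold pvWrite2 PySem.List.pyGet? PySem.List.pySet? PySem.List.pySetD PySem.List.pySet?
  rw [hk]
  simp [List.getElem?_eq_getElem hklt, ht]

-- a write preserves all lengths, hence all physical coordinates
theorem pvLenD_write {m : List (List Int)} {k t : Nat} {x : Int}
    (hk : k < m.length) :
    ∀ u : Nat, ((m.set k ((m.getD k []).set t x)).getD u []).length = (m.getD u []).length := by
  intro u
  by_cases hu : u < m.length
  · rw [List.getD_eq_getElem _ _ (by simpa using hu), List.getD_eq_getElem _ _ hu]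
    by_cases he : u = k
    · subst he
      rw [List.getElem_set_self (by simpa using hu), List.length_set,
        ← List.getD_eq_getElem m [] hu]
    · rw [List.getElem_set_ne (by omega) (by simpa using hu)]
  · rw [List.getD_eq_default _ _ (by simpa using hu), List.getD_eq_default _ _ (by omega)]

theorem pvPhys_write {m : List (List Int)} {k t : Nat} {x : Int}
    (hk : k < m.length) :
    ∀ p, pvPhys (m.set k ((m.getD k []).set t x)) p = pvPhys m p := by
  intro p
  unfold pvPhys
  rw [List.length_set]
  rcases hk' : PySem.List.pyIdx? m.length p.1 with - | k'
  · rfl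
  · exact congrArg
      (fun n => match PySem.List.pyIdx? n p.2 with | none => none | some t => some (k', t))
      (pvLenD_write hk k')

-- reading after a write: unchanged unless the physical cell is the written one, which now holds x
theorem pvCell_write {m : List (List Int)} {k t : Nat} {x : Int}
    (hk : k < m.length) (ht : t < (m.getD k []).length) :
    ∀ q : Nat × Nat, pvCell (m.set k ((m.getD k []).set t x)) q =
      if q = (k, t) then some x else pvCell m q := by
  intro ⟨a, b⟩
  have hrow : ∀ u : Nat, u ≠ k → (m.set k ((m.getD k []).set t x)).getD u [] = m.getD u [] := by
    intro u hu
    by_cases h : u < m.length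
    · rw [List.getD_eq_getElem _ _ (by simpa using h), List.getD_eq_getElem _ _ h]
      exact List.getElem_set_ne (by omega) (by simpa using h)
    · rw [List.getD_eq_default _ _ (by simpa using h), List.getD_eq_default _ _ (by omega)]
  have hrowk : (m.set k ((m.getD k []).set t x)).getD k [] = (m.getD k []).set t x := by
    rw [List.getD_eq_getElem _ _ (by simpa using hk)]
    exact List.getElem_set_self (by simpa using hk)
  unfold pvCell
  by_cases ha : a = k
  · subst ha
    rw [hrowk]
    by_cases hb : b = t
    · subst hb
      simp [List.getElem?_set_self (by simpa using ht)]
    · simp only [Prod.mk.injEq, hb, and_false, if_false]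
      rw [List.getElem?_set_ne (by omega)]
  · rw [hrow a ha]
    simp [Prod.ext_iff, ha]

def pvNxt (r1 c1 r2 c2 : Int) (p : Int × Int) : Int × Int :=
  if p.1 = r1 ∧ p.2 < c2 then (p.1, p.2 + 1)
  else if p.2 = c2 ∧ p.1 < r2 then (p.1 + 1, p.2)
  else if p.1 = r2 ∧ p.2 > c1 then (p.1, p.2 - 1)
  else (p.1 - 1, p.2)

def pvChain (r1 c1 r2 c2 : Int) : (Int × Int) → List (Int × Int) → (Int × Int) → Prop
  | s, [], e => s = e
  | s, p :: T, e => s = p ∧ p ≠ (r1, c1) ∧ pvChain r1 c1 r2 c2 (pvNxt r1 c1 r2 c2 p) T e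

theorem pvChain_append {r1 c1 r2 c2 : Int} {s mid e : Int × Int} {X Y : List (Int × Int)}
    (hx : pvChain r1 c1 r2 c2 s X mid) (hy : pvChain r1 c1 r2 c2 mid Y e) :
    pvChain r1 c1 r2 c2 s (X ++ Y) e := by
  induction X generalizing s with
  | nil =>
    have h : s = mid := hx
    subst h
    exact hy
  | cons p T ih =>
    obtain ⟨h1, h2, h3⟩ := hx
    exact ⟨h1, h2, ih h3⟩

-- unpack one non-exit iteration of the loop that returned a value
theorem pvLoopA_step {r1 c1 r2 c2 : Int} {fuel : Nat} {m : List (List Int)}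
    {rp cp ins minv res : Int}
    (h : pvLoopA r1 c1 r2 c2 (fuel + 1) m rp cp ins minv = some res)
    (hne : ¬(rp = r1 ∧ cp = c1)) :
    ∃ t m', pvRead2 m rp cp = some t ∧ pvWrite2 m rp cp ins = some m' ∧
      pvLoopA r1 c1 r2 c2 fuel m' (pvNxt r1 c1 r2 c2 (rp, cp)).1
        (pvNxt r1 c1 r2 c2 (rp, cp)).2 t (min minv t) = some res := by
  rw [pvLoopA, if_neg hne] at h
  rcases hr : pvRead2 m rp cp with - | t <;> rw [hr] at h
  · exact absurd h (by simp)
  rcases hw : pvWrite2 m rp cp ins with - | m' <;> rw [hw] at h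
  · exact absurd h (by simp)
  refine ⟨t, m', rfl, rfl, ?_⟩
  have hch : (if rp = r1 ∧ cp < c2 then pvLoopA r1 c1 r2 c2 fuel m' rp (cp + 1) t (min minv t)
      else if cp = c2 ∧ rp < r2 then pvLoopA r1 c1 r2 c2 fuel m' (rp + 1) cp t (min minv t)
      else if rp = r2 ∧ cp > c1 then pvLoopA r1 c1 r2 c2 fuel m' rp (cp - 1) t (min minv t)
      else pvLoopA r1 c1 r2 c2 fuel m' (rp - 1) cp t (min minv t)) =
      pvLoopA r1 c1 r2 c2 fuel m' (pvNxt r1 c1 r2 c2 (rp, cp)).1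
        (pvNxt r1 c1 r2 c2 (rp, cp)).2 t (min minv t) := by
    unfold pvNxt
    split_ifs <;> rfl
  rw [← hch]
  simpa using h

-- the loop's result never exceeds the running minimum
theorem pvLoopA_le_minv (r1 c1 r2 c2 : Int) :
    ∀ (fuel : Nat) (m : List (List Int)) (rp cp ins minv res : Int),
    pvLoopA r1 c1 r2 c2 fuel m rp cp ins minv = some res → res ≤ minv := by
  intro fuel
  induction fuel with
  | zero => intro m rp cp ins minv res h; exact absurd h (by simp [pvLoopA])
  | succ fuel ih =>
    intro m rp cp ins minv res h
    by_cases hne : rp = r1 ∧ cp = c1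
    · rw [pvLoopA, if_pos hne] at h
      rcases hw : pvWrite2 m rp cp ins with - | m' <;> rw [hw] at h
      · exact absurd h (by simp)
      · simp only [Option.map_some, Option.some.injEq] at h
        omega
    · obtain ⟨t, m', -, -, hrec⟩ := pvLoopA_step h hne
      have := ih _ _ _ _ _ _ hrec
      omega

-- lower bound: if every border cell the loop can touch holds a value ≥ lb, the result is ≥ lb
theorem pvLoopA_ge (r1 c1 r2 c2 : Int) (lb : Int) :
    ∀ (L : List (Int × Int)) (fuel : Nat) (m : List (List Int)) (s : Int × Int) (ins minv : Int),
    L.length < fuel →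
    pvChain r1 c1 r2 c2 s L (r1, c1) →
    (∀ p ∈ (r1, c1) :: L, ∃ v, pvRead2 m p.1 p.2 = some v ∧ lb ≤ v) →
    lb ≤ ins → lb ≤ minv →
    ∃ res, pvLoopA r1 c1 r2 c2 fuel m s.1 s.2 ins minv = some res ∧ lb ≤ res := by
  intro L
  induction L with
  | nil =>
    intro fuel m s ins minv hfuel hch hrd hins hminv
    obtain ⟨fuel, rfl⟩ : ∃ f, fuel = f + 1 := ⟨fuel - 1, by omega⟩
    have hs : s = (r1, c1) := hch
    subst hs
    obtain ⟨v, hv, -⟩ := hrd (r1, c1) (by simp)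
    rw [pvRead2_eq] at hv
    rcases hq : pvPhys m ((r1, c1).1, (r1, c1).2) with - | q <;> rw [hq] at hv
    · exact absurd hv (by simp)
    refine ⟨min minv ins, ?_, by omega⟩
    rw [pvLoopA, if_pos ⟨rfl, rfl⟩, pvWrite2_eq ins hq]
    rfl
  | cons p T ih =>
    intro fuel m s ins minv hfuel hch hrd hins hminv
    obtain ⟨fuel, rfl⟩ : ∃ f, fuel = f + 1 := ⟨fuel - 1, by omega⟩
    obtain ⟨hsp, hpne, hch2⟩ := hch
    subst s
    obtain ⟨t, hrt, hlbt⟩ := hrd p (by simp)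
    have hrt' := hrt
    rw [pvRead2_eq] at hrt'
    rcases hq : pvPhys m (p.1, p.2) with - | q <;> rw [hq] at hrt'
    · exact absurd hrt' (by simp)
    have hcell : pvCell m q = some t := by simpa using hrt'
    have hklt : q.1 < m.length := by
      unfold pvPhys at hq
      rcases h1 : PySem.List.pyIdx? m.length p.1 with - | k <;> simp only [h1] at hq
      · exact absurd hq (by simp)
      rcases h2 : PySem.List.pyIdx? (m.getD k []).length p.2 with - | u <;> simp only [h2] at hq
      · exact absurd hq (by simp)
      simp only [Option.some.injEq] at hq
      rw [← hq]
      exact pvIdx_lt h1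
    have htlt : q.2 < (m.getD q.1 []).length := by
      unfold pvCell at hcell
      by_contra hcon
      rw [List.getElem?_eq_none (by omega)] at hcell
      simp at hcell
    have hw := pvWrite2_eq (k := q.1) (t := q.2) ins (by simpa using hq)
    have hne1 : ¬(p.1 = r1 ∧ p.2 = c1) := fun h => hpne (Prod.ext_iff.mpr h)
    -- reads in the written matrix: old value or the written ins, both ≥ lb
    have hrd2 : ∀ x ∈ (r1, c1) :: T, ∃ v,
        pvRead2 (m.set q.1 ((m.getD q.1 []).set q.2 ins)) x.1 x.2 = some v ∧ lb ≤ v := by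
      intro x hx
      obtain ⟨v, hv, hlbv⟩ := hrd x (by
        rcases List.mem_cons.mp hx with h | h
        · simp [h]
        · simp [h])
      rw [pvRead2_eq] at hv ⊢
      rw [pvPhys_write hklt]
      rcases hqx : pvPhys m (x.1, x.2) with - | qx <;> rw [hqx] at hv
      · exact absurd hv (by simp)
      simp only [Option.bind_some] at hv ⊢
      rw [pvCell_write hklt htlt]
      by_cases he : qx = (q.1, q.2)
      · exact ⟨ins, by simp [he], hins⟩
      · exact ⟨v, by simpa [he] using hv, hlbv⟩
    obtain ⟨res, hres, hlbres⟩ := ih fuel (m.set q.1 ((m.getD q.1 []).set q.2 ins))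
      (pvNxt r1 c1 r2 c2 p) t (min minv t)
      (by simpa using Nat.lt_of_succ_lt_succ hfuel) hch2 hrd2 hlbt (by omega)
    refine ⟨res, ?_, hlbres⟩
    rw [pvLoopA, if_neg hne1, hrt, hw]
    have hch3 : (if p.1 = r1 ∧ p.2 < c2 then
          pvLoopA r1 c1 r2 c2 fuel (m.set q.1 ((m.getD q.1 []).set q.2 ins)) p.1 (p.2 + 1) t (min minv t)
        else if p.2 = c2 ∧ p.1 < r2 then
          pvLoopA r1 c1 r2 c2 fuel (m.set q.1 ((m.getD q.1 []).set q.2 ins)) (p.1 + 1) p.2 t (min minv t)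
        else if p.1 = r2 ∧ p.2 > c1 then
          pvLoopA r1 c1 r2 c2 fuel (m.set q.1 ((m.getD q.1 []).set q.2 ins)) p.1 (p.2 - 1) t (min minv t)
        else pvLoopA r1 c1 r2 c2 fuel (m.set q.1 ((m.getD q.1 []).set q.2 ins)) (p.1 - 1) p.2 t (min minv t)) =
        pvLoopA r1 c1 r2 c2 fuel (m.set q.1 ((m.getD q.1 []).set q.2 ins))
          (pvNxt r1 c1 r2 c2 p).1 (pvNxt r1 c1 r2 c2 p).2 t (min minv t) := by
      unfold pvNxt
      split_ifs <;> rfl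
    exact hch3.trans hres

-- upper bound: the result is ≤ the current value of the first physically fresh cell on the path
theorem pvLoopA_le_cell (r1 c1 r2 c2 : Int) :
    ∀ (L1 L2 : List (Int × Int)) (q : Int × Int) (fuel : Nat) (m : List (List Int))
      (s : Int × Int) (ins minv res vq : Int),
    pvChain r1 c1 r2 c2 s (L1 ++ q :: L2) (r1, c1) →
    pvLoopA r1 c1 r2 c2 fuel m s.1 s.2 ins minv = some res →
    pvRead2 m q.1 q.2 = some vq →
    (∀ p ∈ L1, pvPhys m p ≠ pvPhys m q) →
    res ≤ vq := by
  intro L1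
  induction L1 with
  | nil =>
    intro L2 q fuel m s ins minv res vq hch hloop hrq _
    obtain ⟨fuel, rfl⟩ : ∃ f, fuel = f + 1 := by
      rcases fuel with - | f
      · exact absurd hloop (by simp [pvLoopA])
      · exact ⟨f, rfl⟩
    obtain ⟨hsq, hqne, -⟩ := hch
    subst s
    obtain ⟨t, m', hrt, -, hrec⟩ := pvLoopA_step hloop
      (fun h => hqne (Prod.ext_iff.mpr h))
    rw [hrt] at hrq
    obtain rfl : t = vq := by simpa using hrq
    have := pvLoopA_le_minv r1 c1 r2 c2 _ _ _ _ _ _ _ hrec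
    omega
  | cons p L1 ih =>
    intro L2 q fuel m s ins minv res vq hch hloop hrq hfresh
    obtain ⟨fuel, rfl⟩ : ∃ f, fuel = f + 1 := by
      rcases fuel with - | f
      · exact absurd hloop (by simp [pvLoopA])
      · exact ⟨f, rfl⟩
    obtain ⟨hsp, hpne, hch2⟩ := hch
    subst s
    obtain ⟨t, m', hrt, hw, hrec⟩ := pvLoopA_step hloop
      (fun h => hpne (Prod.ext_iff.mpr h))
    -- identify the written physical cell
    have hrt' := hrt
    rw [pvRead2_eq] at hrt'
    rcases hqp : pvPhys m (p.1, p.2) with - | qp <;> rw [hqp] at hrt'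
    · exact absurd hrt' (by simp)
    have hklt : qp.1 < m.length := by
      unfold pvPhys at hqp
      rcases h1 : PySem.List.pyIdx? m.length p.1 with - | k <;> simp only [h1] at hqp
      · exact absurd hqp (by simp)
      rcases h2 : PySem.List.pyIdx? (m.getD k []).length p.2 with - | u <;> simp only [h2] at hqp
      · exact absurd hqp (by simp)
      simp only [Option.some.injEq] at hqp
      rw [← hqp]
      exact pvIdx_lt h1
    have htlt : qp.2 < (m.getD qp.1 []).length := by
      have hcell : pvCell m qp = some t := by simpa using hrt'
      unfold pvCell at hcell
      by_contra hcon
      rw [List.getElem?_eq_none (by omega)] at hcell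
      simp at hcell
    have hw' := pvWrite2_eq (k := qp.1) (t := qp.2) ins (by simpa using hqp)
    rw [hw'] at hw
    obtain rfl : m' = m.set qp.1 ((m.getD qp.1 []).set qp.2 ins) := by
      simpa using hw.symm
    -- q's read is untouched: its physical cell differs from the written one
    have hphys_pq := hfresh p (by simp)
    have hrq' : pvRead2 (m.set qp.1 ((m.getD qp.1 []).set qp.2 ins)) q.1 q.2 = some vq := by
      rw [pvRead2_eq] at hrq ⊢
      rw [pvPhys_write hklt]
      rcases hqq : pvPhys m (q.1, q.2) with - | qq <;> rw [hqq] at hrq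
      · exact absurd hrq (by simp)
      simp only [Option.bind_some] at hrq ⊢
      rw [pvCell_write hklt htlt]
      have hne : qq ≠ (qp.1, qp.2) := by
        intro he
        apply hphys_pq
        rw [hqp, hqq, he]
      simpa [hne] using hrq
    exact ih L2 q fuel _ _ t (min minv t) res vq hch2 hrec hrq' (by
      intro x hx
      rw [pvPhys_write hklt, pvPhys_write hklt]
      exact hfresh x (by simp [hx]))

-- decompose a list at the first element with a given image
theorem pvFirstOcc {α β : Type} (f : α → β) [DecidableEq β] :
    ∀ (C : List α) (q : α), q ∈ C →
    ∃ C1 x C2, C = C1 ++ x :: C2 ∧ f x = f q ∧ ∀ p ∈ C1, f p ≠ f q := by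
  intro C
  induction C with
  | nil => intro q hq; exact absurd hq (by simp)
  | cons c T ih =>
    intro q hq
    by_cases hc : f c = f q
    · exact ⟨[], c, T, by simp, hc, by simp⟩
    · have hqT : q ∈ T := by
        rcases List.mem_cons.mp hq with h | h
        · exact absurd (h ▸ rfl) hc
        · exact h
      obtain ⟨C1, x, C2, h1, h2, h3⟩ := ih q hqT
      exact ⟨c :: C1, x, C2, by simp [h1], h2, by
        intro p hp
        rcases List.mem_cons.mp hp with h | h
        · exact h ▸ hc
        · exact h3 p h⟩

theorem pvFoldlMin_le_init : ∀ (l : List Int) (a : Int), l.foldl min a ≤ a := by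
  intro l
  induction l with
  | nil => intro a; simp
  | cons x t ih => intro a; exact le_trans (ih (min a x)) (by omega)

theorem pvFoldlMin_le_mem : ∀ (l : List Int) (a x : Int), x ∈ l → l.foldl min a ≤ x := by
  intro l
  induction l with
  | nil => intro a x hx; exact absurd hx (by simp)
  | cons y t ih =>
    intro a x hx
    rcases List.mem_cons.mp hx with h | h
    · subst h
      exact le_trans (pvFoldlMin_le_init t (min a x)) (by omega)
    · exact ih (min a y) x h

theorem pvLe_foldlMin : ∀ (l : List Int) (a b : Int), b ≤ a → (∀ x ∈ l, b ≤ x) →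
    b ≤ l.foldl min a := by
  intro l
  induction l with
  | nil => intro a b h _; simpa using h
  | cons y t ih =>
    intro a b h hall
    exact ih (min a y) b (by have := hall y (by simp); omega)
      fun x hx => hall x (by simp [hx])

theorem pvTopChain (r1 c1 r2 c2 : Int) (hrr : r1 < r2) :
    ∀ n : Nat, ∀ a : Int, c1 < a → a ≤ c2 → (c2 - a).toNat = n →
    pvChain r1 c1 r2 c2 (r1, a) ((PySem.List.pyRange a (c2 + 1) 1).map fun c => (r1, c))
      (r1 + 1, c2) := by
  intro n
  induction n with
  | zero =>
    intro a h1 h2 h3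
    have ha : a = c2 := by omega
    subst ha
    rw [PySem.List.pyRange_one_singleton]
    exact ⟨rfl, by intro h; simp [Prod.mk.injEq] at h; omega, by simp [pvChain, pvNxt]; omega⟩
  | succ n ihn =>
    intro a h1 h2 h3
    rw [PySem.List.pyRange_one_cons (by omega)]
    refine ⟨rfl, by intro h; simp [Prod.mk.injEq] at h; omega, ?_⟩
    have hnx : pvNxt r1 c1 r2 c2 (r1, a) = (r1, a + 1) := by
      simp [pvNxt]; omega
    rw [hnx]
    exact ihn (a + 1) (by omega) (by omega) (by omega)

theorem pvRightChain (r1 c1 r2 c2 : Int) (hrr : r1 < r2) (hcc : c1 < c2) :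
    ∀ n : Nat, ∀ a : Int, r1 < a → a ≤ r2 → (r2 - a).toNat = n →
    pvChain r1 c1 r2 c2 (a, c2) ((PySem.List.pyRange a (r2 + 1) 1).map fun r => (r, c2))
      (r2, c2 - 1) := by
  intro n
  induction n with
  | zero =>
    intro a h1 h2 h3
    have ha : a = r2 := by omega
    subst ha
    rw [PySem.List.pyRange_one_singleton]
    exact ⟨rfl, by intro h; simp [Prod.mk.injEq] at h; omega, by simp [pvChain, pvNxt]; omega⟩
  | succ n ihn =>
    intro a h1 h2 h3
    rw [PySem.List.pyRange_one_cons (by omega)]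
    refine ⟨rfl, by intro h; simp [Prod.mk.injEq] at h; omega, ?_⟩
    have hnx : pvNxt r1 c1 r2 c2 (a, c2) = (a + 1, c2) := by
      simp [pvNxt]; omega
    rw [hnx]
    exact ihn (a + 1) (by omega) (by omega) (by omega)

theorem pvBottomChain (r1 c1 r2 c2 : Int) (hrr : r1 < r2) (hcc : c1 < c2) :
    ∀ n : Nat, ∀ a : Int, c1 ≤ a → a ≤ c2 - 1 → (a - c1).toNat = n →
    pvChain r1 c1 r2 c2 (r2, a) ((PySem.List.pyRange a (c1 - 1) (-1)).map fun c => (r2, c))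
      (r2 - 1, c1) := by
  intro n
  induction n with
  | zero =>
    intro a h1 h2 h3
    have ha : a = c1 := by omega
    subst ha
    rw [PySem.List.pyRange_neg_one_cons (by omega), PySem.List.pyRange_neg_one_eq_nil (by omega)]
    exact ⟨rfl, by intro h; simp [Prod.mk.injEq] at h; omega, by simp [pvChain, pvNxt]; omega⟩
  | succ n ihn =>
    intro a h1 h2 h3
    rw [PySem.List.pyRange_neg_one_cons (by omega)]
    refine ⟨rfl, by intro h; simp [Prod.mk.injEq] at h; omega, ?_⟩
    have hnx : pvNxt r1 c1 r2 c2 (r2, a) = (r2, a - 1) := by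
      unfold pvNxt
      split_ifs with h1 h2 h3 <;> first | rfl | (simp [Prod.mk.injEq] at * <;> omega)
    rw [hnx]
    exact ihn (a - 1) (by omega) (by omega) (by omega)

theorem pvLeftChain (r1 c1 r2 c2 : Int) (hrr : r1 < r2) (hcc : c1 < c2) :
    ∀ n : Nat, ∀ a : Int, r1 ≤ a → a ≤ r2 - 1 → (a - r1).toNat = n →
    pvChain r1 c1 r2 c2 (a, c1) ((PySem.List.pyRange a r1 (-1)).map fun r => (r, c1))
      (r1, c1) := by
  intro n
  induction n with
  | zero =>
    intro a h1 h2 h3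
    have ha : a = r1 := by omega
    subst ha
    rw [PySem.List.pyRange_neg_one_eq_nil (by omega)]
    simp [pvChain]
  | succ n ihn =>
    intro a h1 h2 h3
    rw [PySem.List.pyRange_neg_one_cons (by omega)]
    refine ⟨rfl, by intro h; simp [Prod.mk.injEq] at h; omega, ?_⟩
    have hnx : pvNxt r1 c1 r2 c2 (a, c1) = (a - 1, c1) := by
      unfold pvNxt
      split_ifs with h1 h2 h3 <;> first | rfl | (simp [Prod.mk.injEq] at * <;> omega)
    rw [hnx]
    exact ihn (a - 1) (by omega) (by omega) (by omega)

theorem pvCoords_mem (r1 c1 r2 c2 : Int) {p : Int × Int} (hp : p ∈ pvCoords r1 c1 r2 c2) :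
    (p.1 = r1 ∧ c1 ≤ p.2 ∧ p.2 < c2 + 1) ∨ (r1 + 1 ≤ p.1 ∧ p.1 < r2 + 1 ∧ p.2 = c2) ∨
    (p.1 = r2 ∧ c1 - 1 < p.2 ∧ p.2 ≤ c2 - 1) ∨ (r1 < p.1 ∧ p.1 ≤ r2 - 1 ∧ p.2 = c1) := by
  unfold pvCoords at hp
  simp only [List.mem_append, List.mem_map] at hp
  rcases hp with ((⟨x, hx, rfl⟩ | ⟨x, hx, rfl⟩) | ⟨x, hx, rfl⟩) | ⟨x, hx, rfl⟩
  · exact Or.inl ⟨rfl, (PySem.List.mem_pyRange_one.mp hx).1, (PySem.List.mem_pyRange_one.mp hx).2⟩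
  · exact Or.inr (Or.inl ⟨(PySem.List.mem_pyRange_one.mp hx).1, (PySem.List.mem_pyRange_one.mp hx).2, rfl⟩)
  · exact Or.inr (Or.inr (Or.inl ⟨rfl, (PySem.List.mem_pyRange_neg_one.mp hx).1, (PySem.List.mem_pyRange_neg_one.mp hx).2⟩))
  · exact Or.inr (Or.inr (Or.inr ⟨(PySem.List.mem_pyRange_neg_one.mp hx).1, (PySem.List.mem_pyRange_neg_one.mp hx).2, rfl⟩))

theorem pvMapM_some {α β : Type} (f : α → Option β) (g : α → β) :
    ∀ l : List α, (∀ p ∈ l, f p = some (g p)) → l.mapM f = some (l.map g) := by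
  intro l h
  induction l with
  | nil => rfl
  | cons x t ih =>
    rw [List.map_cons, List.mapM_cons, h x (by simp),
      ih fun p hp => h p (by simp [hp])]
    rfl

theorem pvIdx_some {n : Nat} {i : Int} (h1 : -(n : Int) ≤ i) (h2 : i < (n : Int)) :
    ∃ k, PySem.List.pyIdx? n i = some k := by
  rcases h : PySem.List.pyIdx? n i with - | k
  · unfold PySem.List.pyIdx? at h
    split_ifs at h
  · exact ⟨k, rfl⟩

-- inside the stated bounds every border subscript resolves (possibly negative, Python wrap)
theorem pvReadOK2 (m : List (List Int)) (r1 c1 r2 c2 : Int)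
    (h3 : -(m.length : Int) ≤ r1) (h5 : r2 < (m.length : Int))
    (h6 : ∀ r ∈ PySem.List.pyRange r1 (r2 + 1) 1,
      -((PySem.List.pyGetD m r []).length : Int) ≤ c1 ∧
        c2 < ((PySem.List.pyGetD m r []).length : Int)) :
    ∀ p : Int × Int, r1 ≤ p.1 → p.1 ≤ r2 → c1 ≤ p.2 → p.2 ≤ c2 →
      ∃ v, pvRead2 m p.1 p.2 = some v := by
  intro p hb1 hb2 hb3 hb4
  obtain ⟨k, hk⟩ := pvIdx_some (n := m.length) (i := p.1) (by omega) (by omega)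
  have hklt := pvIdx_lt hk
  have hrowD : PySem.List.pyGetD m p.1 [] = m.getD k [] := by
    unfold PySem.List.pyGetD PySem.List.pyGet?
    rw [hk]
    simp only [Option.bind_some, List.getElem?_eq_getElem hklt, Option.getD_some]
    exact (List.getD_eq_getElem m [] hklt).symm
  obtain ⟨hc1, hc2⟩ := h6 p.1 (PySem.List.mem_pyRange_one.mpr ⟨hb1, by omega⟩)
  rw [hrowD] at hc1 hc2
  obtain ⟨tt, htt⟩ := pvIdx_some (n := (m.getD k []).length) (i := p.2) (by omega) (by omega)
  have httlt := pvIdx_lt htt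
  refine ⟨(m.getD k [])[tt], ?_⟩
  rw [pvRead2_eq]
  unfold pvPhys
  simp only [hk, htt]
  unfold pvCell
  exact List.getElem?_eq_getElem httlt

theorem main_eq : ∀ (matrix : List (List Int)) (query : Int × Int × Int × Int),
    Pre_turning_and_min matrix query →
    turning_and_min matrix query = turning_and_min_alt matrix query := by
  rintro matrix ⟨r1, c1, r2, c2⟩ hpre
  obtain ⟨h2, h4, h3, h5, h6⟩ := hpre
  simp only at h2 h4 h3 h5 h6
  -- original value at a subscript pair, and validity of every border read
  set w : Int × Int → Int := fun p => (pvRead2 matrix p.1 p.2).getD 0 with hw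
  have hok := pvReadOK2 matrix r1 c1 r2 c2 h3 h5 h6
  have hval : ∀ p ∈ pvCoords r1 c1 r2 c2, pvRead2 matrix p.1 p.2 = some (w p) := by
    intro p hp
    have hb := pvCoords_mem r1 c1 r2 c2 hp
    obtain ⟨v, hv⟩ := hok p (by omega) (by omega) (by omega) (by omega)
    rw [hw]
    simp only [hv, Option.getD_some]
  -- split the head off the coordinate list
  set T : List (Int × Int) :=
      ((((PySem.List.pyRange (c1 + 1) (c2 + 1) 1).map fun c => (r1, c)) ++
        ((PySem.List.pyRange (r1 + 1) (r2 + 1) 1).map fun r => (r, c2))) ++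
        ((PySem.List.pyRange (c2 - 1) (c1 - 1) (-1)).map fun c => (r2, c))) ++
        ((PySem.List.pyRange (r2 - 1) r1 (-1)).map fun r => (r, c1)) with hT
  have hsplit : pvCoords r1 c1 r2 c2 = (r1, c1) :: T := by
    rw [hT]
    unfold pvCoords
    rw [PySem.List.pyRange_one_cons (show c1 < c2 + 1 by omega)]
    simp [List.cons_append]
  have hchain : pvChain r1 c1 r2 c2 (r1, c1 + 1) T (r1, c1) := by
    have ch1 := pvTopChain r1 c1 r2 c2 h2 _ (c1 + 1) (by omega) (by omega) rfl
    have ch2 := pvRightChain r1 c1 r2 c2 h2 h4 _ (r1 + 1) (by omega) (by omega) rfl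
    have ch3 := pvBottomChain r1 c1 r2 c2 h2 h4 _ (c2 - 1) (by omega) (by omega) rfl
    have ch4 := pvLeftChain r1 c1 r2 c2 h2 h4 _ (r2 - 1) (by omega) (by omega) rfl
    exact pvChain_append (pvChain_append (pvChain_append ch1 ch2) ch3) ch4
  have hfuel : T.length < 2 * ((r2 - r1).toNat + (c2 - c1).toNat) + 2 := by
    simp only [hT, List.length_append, List.length_map,
      PySem.List.length_pyRange_one, PySem.List.length_pyRange_neg_one]
    omega
  have hvalC : ∀ p ∈ (r1, c1) :: T, pvRead2 matrix p.1 p.2 = some (w p) := by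
    rw [← hsplit]; exact hval
  set M : Int := (T.map w).foldl min (w (r1, c1)) with hM
  -- lower bound M for the loop
  have hlb : ∀ p ∈ (r1, c1) :: T, ∃ v, pvRead2 matrix p.1 p.2 = some v ∧ M ≤ v := by
    intro p hp
    refine ⟨w p, hvalC p hp, ?_⟩
    rcases List.mem_cons.mp hp with h | h
    · rw [h, hM]
      exact pvFoldlMin_le_init _ _
    · exact pvFoldlMin_le_mem _ _ _ (List.mem_map.mpr ⟨p, h, rfl⟩)
  obtain ⟨res, hres, hge⟩ := pvLoopA_ge r1 c1 r2 c2 M T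
    (2 * ((r2 - r1).toNat + (c2 - c1).toNat) + 2) matrix (r1, c1 + 1)
    (w (r1, c1)) (w (r1, c1)) hfuel hchain hlb
    (pvFoldlMin_le_init _ _) (pvFoldlMin_le_init _ _)
  -- upper bound: res is ≤ every original border value
  have hub : res ≤ M := by
    apply pvLe_foldlMin
    · exact pvLoopA_le_minv r1 c1 r2 c2 _ _ _ _ _ _ _ hres
    · intro x hx
      obtain ⟨p, hpT, rfl⟩ := List.mem_map.mp hx
      obtain ⟨C1, y, C2, hdec, hphys, hfresh⟩ :=
        pvFirstOcc (fun p => pvPhys matrix p) ((r1, c1) :: T) p (by simp [hpT])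
      have hwy : w y = w p := by
        have hy := hvalC y (by rw [hdec]; simp)
        have hp := hvalC p (by simp [hpT])
        rw [pvRead2_eq] at hy hp
        have : pvPhys matrix (y.1, y.2) = pvPhys matrix (p.1, p.2) := hphys
        rw [this, hp] at hy
        exact (by simpa using hy : w p = w y).symm
      rcases C1 with - | ⟨c0, L1⟩
      · -- the first physical occurrence is the head cell: res ≤ the running minimum
        have hy0 : y = (r1, c1) := by
          have := hdec
          simp only [List.nil_append] at this
          exact (List.cons_eq_cons.mp this).1.symm
        have := pvLoopA_le_minv r1 c1 r2 c2 _ _ _ _ _ _ _ hres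
        rw [← hwy, hy0]
        omega
      · -- the first physical occurrence is on the walked path: its read is still the original
        have hc0 : c0 = (r1, c1) ∧ T = L1 ++ y :: C2 := by
          have := hdec
          simp only [List.cons_append] at this
          exact ⟨(List.cons_eq_cons.mp this).1.symm, (List.cons_eq_cons.mp this).2⟩
        rw [← hwy]
        refine pvLoopA_le_cell r1 c1 r2 c2 L1 C2 y _ matrix (r1, c1 + 1)
          (w (r1, c1)) (w (r1, c1)) res (w y) (hc0.2 ▸ hchain) hres
          (hvalC y (by rw [hdec]; simp)) ?_
        intro x hx he
        exact hfresh x (by simp [hx]) (he.trans hphys)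
  have hresM : res = M := le_antisymm hub hge
  have hv0 : pvRead2 matrix r1 c1 = some (w (r1, c1)) := hvalC (r1, c1) (by simp)
  have hres' : pvLoopA r1 c1 r2 c2 (2 * ((r2 - r1).toNat + (c2 - c1).toNat) + 2)
      matrix r1 (c1 + 1) (w (r1, c1)) (w (r1, c1)) = some res := hres
  have hmap := pvMapM_some (fun p => pvRead2 matrix p.1 p.2) w (pvCoords r1 c1 r2 c2) hval
  simp only [turning_and_min, turning_and_min_alt, hv0, hmap, hres', Option.getD_some]
  rw [hsplit, List.map_cons, PySem.List.min?_id_cons]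
  simp only [Option.getD_some]
  rw [hresM, hM]

-- ===== VERDICT (by name: the statement is the Claim_ definition above) =====
theorem turning_and_min_spec : Claim_equal_turning_and_min := by
  intro matrix query _ hpre
  unfold Spec_turning_and_min
  exact main_eq matrix query hpre
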